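-- pv_equiv track=rewrite | github.com/IrohaHyphen/LeetCode | src/Problem2658/Solution.py | dfs
-- ===== SOURCE A (Python) =====
-- def dfs(grid, i, j, visited, current_max) -> int:
--     # explore north
--     if j > 0 and (i, j - 1) not in visited and grid[i][j - 1] > 0:
--         visited.add((i, j - 1))
--         current_max += grid[i][j - 1]
--         current_max = dfs(grid, i, j - 1, visited, current_max)
--
--     # explore east
--     if i < len(grid) - 1 and (i + 1, j) not in visited and grid[i + 1][j] > 0:
--         visited.add((i + 1, j))
--         current_max += grid[i + 1][j]
--         current_max = dfs(grid, i + 1, j, visited, current_max)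
--
--     # explore south
--     if j < len(grid[0]) - 1 and (i, j + 1) not in visited and grid[i][j + 1] > 0:
--         visited.add((i, j + 1))
--         current_max += grid[i][j + 1]
--         current_max = dfs(grid, i, j + 1, visited, current_max)
--
--     # explore west
--     if i > 0 and (i - 1, j) not in visited and grid[i - 1][j] > 0:
--         visited.add((i - 1, j))
--         current_max += grid[i - 1][j]
--         current_max = dfs(grid, i - 1, j, visited, current_max)
--
--     return current_max
-- ===== SOURCE B (Python) =====
-- # BFS by levels instead of A's recursive DFS: a neighbor-list helper plus a frontier loop
-- # that expands one whole level per round; same return value and same in-place `visited` mutation.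
-- def neighbors(grid, ci, cj):
--     out = []
--     if cj > 0:
--         out.append((ci, cj - 1))
--     if ci < len(grid) - 1:
--         out.append((ci + 1, cj))
--     if cj < len(grid[0]) - 1:
--         out.append((ci, cj + 1))
--     if ci > 0:
--         out.append((ci - 1, cj))
--     return out
--
-- def dfs(grid, i, j, visited, current_max) -> int:
--     total = current_max
--     frontier = [(i, j)]
--     while frontier:
--         nxt = []
--         for cell in frontier:
--             for n in neighbors(grid, cell[0], cell[1]):
--                 if n not in visited and grid[n[0]][n[1]] > 0:
--                     visited.add(n)
--                     total += grid[n[0]][n[1]]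
--                     nxt.append(n)
--         frontier = nxt
--     return total
-- ===== Notes on version B (the rewrite author's own statement) =====
-- stated objective: alternative
-- what changed: Replaces A's four-branch recursive DFS with a level-by-level BFS: a neighbor-list helper generates the candidate moves of each cell and a frontier loop expands one whole level per round; the component sum is order-independent so the value is unchanged.
-- outside the precondition, e.g. on dfs([[3], [0]], -3, 0, set(), 9): A returns 12, B returns 12; on dfs([[1, 2], [3, 4], [5]], 0, 0, {(1, 0), (1, 1)}, 0): A returns 3, B returns 3
import Mathlib
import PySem

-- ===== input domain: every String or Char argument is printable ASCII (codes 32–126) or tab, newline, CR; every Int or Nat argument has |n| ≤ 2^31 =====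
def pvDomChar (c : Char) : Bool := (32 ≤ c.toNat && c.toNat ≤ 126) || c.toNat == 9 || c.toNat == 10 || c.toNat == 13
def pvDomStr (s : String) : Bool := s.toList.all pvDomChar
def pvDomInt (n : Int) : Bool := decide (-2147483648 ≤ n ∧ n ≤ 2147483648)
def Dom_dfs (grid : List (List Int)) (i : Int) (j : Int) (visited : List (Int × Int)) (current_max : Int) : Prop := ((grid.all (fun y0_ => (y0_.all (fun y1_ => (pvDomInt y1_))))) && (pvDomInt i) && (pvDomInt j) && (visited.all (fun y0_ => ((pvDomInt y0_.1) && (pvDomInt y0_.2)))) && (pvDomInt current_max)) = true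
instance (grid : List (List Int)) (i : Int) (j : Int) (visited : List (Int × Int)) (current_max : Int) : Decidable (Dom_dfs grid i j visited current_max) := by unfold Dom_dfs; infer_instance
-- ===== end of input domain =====

-- B replaces A's recursive four-branch DFS by a level-by-level BFS (neighbor-list helper +
-- frontier loop); the component sum is order-independent, so the RETURN value agrees — both
-- Pythons also mutate `visited` in place (ending with the same final set; not part of the claim).

-- grid[c.1][c.2] ; exact on Pre_dfs, where every access the two programs perform is in range
-- (the `getD` defaults are never reached there; out-of-range accesses are excluded by Pre_dfs).
def pvCell (grid : List (List Int)) (c : Int × Int) : Int :=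
  (PySem.List.pyGet? ((PySem.List.pyGet? grid c.1).getD []) c.2).getD 0

-- ===== PORT A =====
-- state s = (current_max, visited); fuel only makes the recursion total: under Pre_dfs each
-- recursive call is preceded by adding a fresh cell (of a finite box) to visited, so
-- (2*rows)*(2*cols) + 1 fuel is never exhausted (proved below as part of dfsGo_spec).
def dfsGo (grid : List (List Int)) : Nat → Int → Int → List (Int × Int) → Int → Int × List (Int × Int)
  | 0, _, _, v, c => (c, v)
  | fuel+1, i, j, v, c =>
    let s0 : Int × List (Int × Int) := (c, v)
    -- explore north
    let s1 := if j > 0 ∧ (i, j - 1) ∉ s0.2 ∧ pvCell grid (i, j - 1) > 0 then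
        dfsGo grid fuel i (j - 1) (PySem.Set.add s0.2 (i, j - 1)) (s0.1 + pvCell grid (i, j - 1))
      else s0
    -- explore east
    let s2 := if i < (grid.length : Int) - 1 ∧ (i + 1, j) ∉ s1.2 ∧ pvCell grid (i + 1, j) > 0 then
        dfsGo grid fuel (i + 1) j (PySem.Set.add s1.2 (i + 1, j)) (s1.1 + pvCell grid (i + 1, j))
      else s1
    -- explore south  (len(grid[0]) : Pre_dfs guarantees grid ≠ [])
    let s3 := if j < ((grid.headD []).length : Int) - 1 ∧ (i, j + 1) ∉ s2.2 ∧ pvCell grid (i, j + 1) > 0 then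
        dfsGo grid fuel i (j + 1) (PySem.Set.add s2.2 (i, j + 1)) (s2.1 + pvCell grid (i, j + 1))
      else s2
    -- explore west
    let s4 := if i > 0 ∧ (i - 1, j) ∉ s3.2 ∧ pvCell grid (i - 1, j) > 0 then
        dfsGo grid fuel (i - 1) j (PySem.Set.add s3.2 (i - 1, j)) (s3.1 + pvCell grid (i - 1, j))
      else s3
    s4

def dfs (grid : List (List Int)) (i : Int) (j : Int) (visited : List (Int × Int)) (current_max : Int) : Int :=
  (dfsGo grid ((2 * grid.length) * (2 * (grid.headD []).length) + 1) i j visited current_max).1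

-- ===== PORT B =====
-- neighbors(grid, ci, cj): the candidate moves of one cell, built by four conditional appends
def nbrs (grid : List (List Int)) (ci cj : Int) : List (Int × Int) :=
  let l1 := if cj > 0 then [(ci, cj - 1)] else []
  let l2 := if ci < (grid.length : Int) - 1 then l1 ++ [(ci + 1, cj)] else l1
  let l3 := if cj < ((grid.headD []).length : Int) - 1 then l2 ++ [(ci, cj + 1)] else l2
  if ci > 0 then l3 ++ [(ci - 1, cj)] else l3

-- the body of B's inner `for n in neighbors(...)` loop; state = (nxt, visited, total)
def visitNbr (grid : List (List Int)) (s : List (Int × Int) × List (Int × Int) × Int)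
    (n : Int × Int) : List (Int × Int) × List (Int × Int) × Int :=
  if n ∉ s.2.1 ∧ pvCell grid n > 0 then
    (s.1 ++ [n], PySem.Set.add s.2.1 n, s.2.2 + pvCell grid n)
  else s

-- the body of B's `for cell in frontier` loop
def visitCell (grid : List (List Int)) (s : List (Int × Int) × List (Int × Int) × Int)
    (cell : Int × Int) : List (Int × Int) × List (Int × Int) × Int :=
  (nbrs grid cell.1 cell.2).foldl (visitNbr grid) s

-- B's `while frontier` loop, one whole level per round; fuel only makes it total: every
-- non-final round adds at least one fresh cell of the finite box (proved in bfsLevels_spec).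
def bfsLevels (grid : List (List Int)) : Nat → List (Int × Int) → List (Int × Int) → Int → Int × List (Int × Int)
  | 0, _, v, t => (t, v)
  | _+1, [], v, t => (t, v)
  | fuel+1, p :: rest, v, t =>
    let s := (p :: rest).foldl (visitCell grid) ([], v, t)
    bfsLevels grid fuel s.1 s.2.1 s.2.2

def dfs_alt (grid : List (List Int)) (i : Int) (j : Int) (visited : List (Int × Int)) (current_max : Int) : Int :=
  (bfsLevels grid ((2 * grid.length) * (2 * (grid.headD []).length) + 2) [(i, j)] visited current_max).1

-- ===== PRECONDITION & SPEC =====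
-- the finite box of cells either program can ever touch from a start inside it: row indices in
-- [-rows, rows) and column indices in [-len(grid[0]), len(grid[0])) (negative = Python wraparound)
def pvBox (grid : List (List Int)) (c : Int × Int) : Prop :=
  -(grid.length : Int) ≤ c.1 ∧ c.1 < (grid.length : Int) ∧
  -((grid.headD []).length : Int) ≤ c.2 ∧ c.2 < ((grid.headD []).length : Int)

-- Pre_ restricts to the task's natural domain: a nonempty grid whose rows are at least as long as
-- row 0 (both programs only touch columns < len(grid[0]) in absolute value), and a start cell in
-- the wraparound range pvBox — there every index either program evaluates is valid for Python.
-- Outside it A raises IndexError (empty/too-ragged grid, start too far out of range) or, on the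
-- rare far-out starts where every guard fails early, returns without the claim covering it;
-- visited.Nodup is the type convention for a Python set and excludes nothing a caller can pass.
def Pre_dfs (grid : List (List Int)) (i : Int) (j : Int) (visited : List (Int × Int)) (current_max : Int) : Prop :=
  grid ≠ [] ∧ (∀ row ∈ grid, (grid.headD []).length ≤ row.length) ∧
  pvBox grid (i, j) ∧ visited.Nodup
instance (grid : List (List Int)) (i : Int) (j : Int) (visited : List (Int × Int)) (current_max : Int) : Decidable (Pre_dfs grid i j visited current_max) := by unfold Pre_dfs pvBox; infer_instance

def pvWitness_dfs : List (List Int) × Int × Int × (List (Int × Int)) × Int := ([[1, 2]], 0, 0, [], 0)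

def Spec_dfs (grid : List (List Int)) (i : Int) (j : Int) (visited : List (Int × Int)) (current_max : Int) (out : Int) : Prop := out = dfs_alt grid i j visited current_max
instance (grid : List (List Int)) (i : Int) (j : Int) (visited : List (Int × Int)) (current_max : Int) (out : Int) : Decidable (Spec_dfs grid i j visited current_max out) := by unfold Spec_dfs; infer_instance

-- ===== CLAIM (what is proved, stated in full; the proofs are below) =====
def Claim_equal_dfs : Prop := ∀ (grid : List (List Int)) (i : Int) (j : Int) (visited : List (Int × Int)) (current_max : Int), Dom_dfs grid i j visited current_max → Pre_dfs grid i j visited current_max → Spec_dfs grid i j visited current_max (dfs grid i j visited current_max)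

-- ===== LEMMAS AND PROOFS =====

-- one DFS move: c is the neighbour of p touched by the N/E/S/W branch whose bounds guard passes
def pvStep (grid : List (List Int)) (p c : Int × Int) : Prop :=
  (c = (p.1, p.2 - 1) ∧ p.2 > 0) ∨
  (c = (p.1 + 1, p.2) ∧ p.1 < (grid.length : Int) - 1) ∨
  (c = (p.1, p.2 + 1) ∧ p.2 < ((grid.headD []).length : Int) - 1) ∨
  (c = (p.1 - 1, p.2) ∧ p.1 > 0)

-- c can be newly visited (w.r.t. visited-set v)
def pvElig (grid : List (List Int)) (v : List (Int × Int)) (c : Int × Int) : Prop :=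
  c ∉ v ∧ pvCell grid c > 0

-- every positive cell one move away from p is already in V
def pvSat (grid : List (List Int)) (V : List (Int × Int)) (p : Int × Int) : Prop :=
  ∀ c, pvStep grid p c → pvCell grid c > 0 → c ∈ V

-- cells reachable from s through cells eligible w.r.t. the fixed set v
inductive pvReach (grid : List (List Int)) (v : List (Int × Int)) : (Int × Int) → (Int × Int) → Prop
  | base (s c : Int × Int) : pvStep grid s c → pvElig grid v c → pvReach grid v s c
  | step (s p c : Int × Int) : pvReach grid v s p → pvStep grid p c → pvElig grid v c → pvReach grid v s c

-- the cells of pvBox, as a list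
def pvAll (grid : List (List Int)) : List (Int × Int) :=
  (List.range (2 * grid.length)).flatMap (fun (r : Nat) =>
    (List.range (2 * (grid.headD []).length)).map (fun (k : Nat) =>
      (((r : Nat) : Int) - grid.length, ((k : Nat) : Int) - (grid.headD []).length)))

-- number of box cells not yet visited: the termination measure
def pvU (grid : List (List Int)) (v : List (Int × Int)) : Nat :=
  (((pvAll grid).toFinset).filter (fun c => c ∉ v)).card

lemma pvStep_box (grid : List (List Int)) (p c : Int × Int)
    (hp : pvBox grid p) (h : pvStep grid p c) : pvBox grid c := by
  obtain ⟨h1, h2, h3, h4⟩ := hp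
  rcases h with ⟨rfl, hg⟩ | ⟨rfl, hg⟩ | ⟨rfl, hg⟩ | ⟨rfl, hg⟩ <;>
    exact ⟨by dsimp only; omega, by dsimp only; omega, by dsimp only; omega, by dsimp only; omega⟩

lemma mem_pvAll (grid : List (List Int)) (c : Int × Int) : c ∈ pvAll grid ↔ pvBox grid c := by
  obtain ⟨a, b⟩ := c
  unfold pvAll pvBox
  rw [List.mem_flatMap]
  constructor
  · rintro ⟨r, hr, hc⟩
    rw [List.mem_range] at hr
    rw [List.mem_map] at hc
    obtain ⟨k, hk, hek⟩ := hc
    rw [List.mem_range] at hk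
    obtain ⟨rfl, rfl⟩ := Prod.mk.injEq .. |>.mp hek.symm
    refine ⟨?_, ?_, ?_, ?_⟩ <;> dsimp only <;> omega
  · rintro ⟨h1, h2, h3, h4⟩
    simp only at h1 h2 h3 h4
    refine ⟨(a + grid.length).toNat, by rw [List.mem_range]; omega, ?_⟩
    rw [List.mem_map]
    refine ⟨(b + (grid.headD []).length).toNat, by rw [List.mem_range]; omega, ?_⟩
    simp only [Prod.mk.injEq]
    constructor <;> omega

lemma pvU_le (grid : List (List Int)) (v : List (Int × Int)) :
    pvU grid v ≤ (2 * grid.length) * (2 * (grid.headD []).length) := by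
  have h1 : pvU grid v ≤ (pvAll grid).toFinset.card := Finset.card_filter_le _ _
  have h2 : (pvAll grid).toFinset.card ≤ (pvAll grid).length := (pvAll grid).toFinset_card_le
  have h3 : (pvAll grid).length = (2 * grid.length) * (2 * (grid.headD []).length) := by
    simp [pvAll, List.length_flatMap]
  omega

lemma pvU_mono (grid : List (List Int)) (v w : List (Int × Int)) (h : ∀ x ∈ v, x ∈ w) :
    pvU grid w ≤ pvU grid v := by
  apply Finset.card_le_card
  intro x hx
  simp only [Finset.mem_filter] at hx ⊢
  exact ⟨hx.1, fun hxv => hx.2 (h x hxv)⟩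

lemma pvU_snoc (grid : List (List Int)) (v : List (Int × Int)) (c : Int × Int)
    (hc : pvBox grid c) (hv : c ∉ v) : pvU grid v = pvU grid (v ++ [c]) + 1 := by
  unfold pvU
  have hins : ((pvAll grid).toFinset).filter (fun x => x ∉ v)
      = insert c (((pvAll grid).toFinset).filter (fun x => x ∉ v ++ [c])) := by
    ext x
    simp only [Finset.mem_insert, Finset.mem_filter, List.mem_toFinset, List.mem_append,
      List.mem_singleton, mem_pvAll]
    constructor
    · rintro ⟨hx, hxv⟩
      by_cases hxc : x = c
      · exact Or.inl hxc
      · exact Or.inr ⟨hx, by tauto⟩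
    · rintro (rfl | ⟨hx, hxx⟩)
      · exact ⟨hc, hv⟩
      · exact ⟨hx, fun h => hxx (Or.inl h)⟩
  rw [hins, Finset.card_insert_of_notMem]
  simp

lemma pvU_zero (grid : List (List Int)) (v : List (Int × Int)) (h : pvU grid v = 0) :
    ∀ c, pvBox grid c → c ∈ v := by
  intro c hc
  by_contra hcv
  have hmem : c ∈ ((pvAll grid).toFinset).filter (fun x => x ∉ v) := by
    simp [Finset.mem_filter, List.mem_toFinset, mem_pvAll, hc, hcv]
  unfold pvU at h
  rw [Finset.card_eq_zero] at h
  rw [h] at hmem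
  simp at hmem

lemma pvReach_mono (grid : List (List Int)) (v v' : List (Int × Int)) (s c : Int × Int)
    (hsub : ∀ x ∈ v, x ∈ v') (h : pvReach grid v' s c) : pvReach grid v s c := by
  induction h with
  | base c hn he => exact pvReach.base _ _ hn ⟨fun hc => he.1 (hsub _ hc), he.2⟩
  | step p c _ hn he ih => exact pvReach.step _ _ _ ih hn ⟨fun hc => he.1 (hsub _ hc), he.2⟩

lemma pvReach_elig (grid : List (List Int)) (v : List (Int × Int)) (s c : Int × Int)
    (h : pvReach grid v s c) : pvElig grid v c := by
  cases h with
  | base _ _ he => exact he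
  | step _ _ _ _ he => exact he

lemma pvReach_trans (grid : List (List Int)) (v : List (Int × Int)) (s p c : Int × Int)
    (h1 : pvReach grid v s p) (h2 : pvReach grid v p c) : pvReach grid v s c := by
  induction h2 with
  | base c hn he => exact pvReach.step _ _ _ h1 hn he
  | step r c _ hn he ih => exact pvReach.step _ _ _ ih hn he

lemma pvSat_mono (grid : List (List Int)) (V V' : List (Int × Int)) (p : Int × Int)
    (hsub : ∀ x ∈ V, x ∈ V') (h : pvSat grid V p) : pvSat grid V' p :=
  fun c hc hpos => hsub _ (h c hc hpos)

lemma pvSet_add_eq (v : List (Int × Int)) (c : Int × Int) (h : c ∉ v) :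
    PySem.Set.add v c = v ++ [c] := by
  simp [PySem.Set.add, PySem.Set.contains, h]

-- invariant carried by A's main lemma: out = (start total + weight of fresh, v ++ fresh),
-- fresh cells are eligible, reachable from p and saturated in the final set
def pvQ (grid : List (List Int)) (p : Int × Int) (v : List (Int × Int)) (c : Int)
    (out : Int × List (Int × Int)) : Prop :=
  ∃ fresh, out = (c + (fresh.map (pvCell grid)).sum, v ++ fresh) ∧ (v ++ fresh).Nodup ∧
    ∀ x ∈ fresh, pvElig grid v x ∧ pvReach grid v p x ∧ pvSat grid (v ++ fresh) x

-- chaining the pvQ invariant through two consecutive program steps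
lemma pvQ_chain (grid : List (List Int)) (p : Int × Int) (v : List (Int × Int)) (c : Int)
    (s1 s2 : Int × List (Int × Int))
    (h1 : pvQ grid p v c s1) (h2 : pvQ grid p s1.2 s1.1 s2) : pvQ grid p v c s2 := by
  obtain ⟨f1, he1, hn1, hx1⟩ := h1
  obtain ⟨f2, he2, hn2, hx2⟩ := h2
  subst he1
  dsimp only at he2 hn2 hx2
  refine ⟨f1 ++ f2, ?_, ?_, ?_⟩
  · rw [he2]
    simp [List.map_append, List.sum_append, List.append_assoc, add_assoc]
  · simpa [List.append_assoc] using hn2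
  · intro x hx
    rcases List.mem_append.mp hx with hx | hx
    · obtain ⟨he, hr, hs⟩ := hx1 x hx
      refine ⟨he, hr, pvSat_mono _ _ _ _ ?_ hs⟩
      intro y hy
      simp only [List.mem_append] at hy ⊢
      tauto
    · obtain ⟨he, hr, hs⟩ := hx2 x hx
      refine ⟨⟨fun hxv => he.1 (by simp [hxv]), he.2⟩, ?_, ?_⟩
      · exact pvReach_mono _ _ _ _ _ (fun y hy => by simp [hy]) hr
      · simpa [List.append_assoc] using hs

-- one guarded branch of A: G is the branch's bounds guard, n the touched neighbour
lemma pvBranchA (grid : List (List Int)) (fuel : Nat) (p n : Int × Int)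
    (G : Prop) [Decidable G] (s : Int × List (Int × Int))
    (hstep : G → pvStep grid p n) (hbox : G → pvBox grid n)
    (hU : pvU grid s.2 ≤ fuel + 1) (hnd : s.2.Nodup)
    (hIH : ∀ i j v c, pvU grid v ≤ fuel → pvBox grid (i, j) → v.Nodup →
      pvQ grid (i, j) v c (dfsGo grid fuel i j v c) ∧ pvSat grid (dfsGo grid fuel i j v c).2 (i, j)) :
    pvQ grid p s.2 s.1
      (if G ∧ n ∉ s.2 ∧ pvCell grid n > 0 then
        dfsGo grid fuel n.1 n.2 (PySem.Set.add s.2 n) (s.1 + pvCell grid n) else s) ∧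
    (n ∈ (if G ∧ n ∉ s.2 ∧ pvCell grid n > 0 then
        dfsGo grid fuel n.1 n.2 (PySem.Set.add s.2 n) (s.1 + pvCell grid n) else s).2
      ∨ ¬(G ∧ pvCell grid n > 0)) := by
  by_cases hcond : G ∧ n ∉ s.2 ∧ pvCell grid n > 0
  · rw [if_pos hcond]
    obtain ⟨hGt, hnv, hpos⟩ := hcond
    have hb : pvBox grid n := hbox hGt
    rw [pvSet_add_eq _ _ hnv]
    have hU' : pvU grid (s.2 ++ [n]) ≤ fuel := by
      have := pvU_snoc grid s.2 n hb hnv; omega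
    have hnd' : (s.2 ++ [n]).Nodup := by
      simp only [List.nodup_append, List.nodup_singleton]
      exact ⟨hnd, trivial, fun a ha b hb' => by
        rw [List.mem_singleton] at hb'; subst hb'; exact fun h => hnv (h ▸ ha)⟩
    obtain ⟨hq, hsat⟩ := hIH n.1 n.2 (s.2 ++ [n]) (s.1 + pvCell grid n) hU'
      (by simpa using hb) hnd'
    simp only [Prod.mk.eta] at hq hsat
    obtain ⟨f1, heq, hnodup, hx⟩ := hq
    have helig : pvElig grid s.2 n := ⟨hnv, hpos⟩
    have hreach : pvReach grid s.2 p n := pvReach.base _ _ (hstep hGt) helig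
    constructor
    · refine ⟨n :: f1, ?_, ?_, ?_⟩
      · rw [heq]
        simp [List.append_assoc, add_assoc]
      · simpa [List.append_assoc] using hnodup
      · intro x hxm
        rcases List.mem_cons.mp hxm with rfl | hxm
        · refine ⟨helig, hreach, ?_⟩
          rw [heq] at hsat
          simpa [List.append_assoc] using hsat
        · obtain ⟨he, hr, hs⟩ := hx x hxm
          refine ⟨⟨fun hxv => he.1 (by simp [hxv]), he.2⟩, ?_, ?_⟩
          · exact pvReach_trans _ _ _ _ _ hreach
              (pvReach_mono _ _ _ _ _ (fun y hy => by simp [hy]) hr)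
          · simpa [List.append_assoc] using hs
    · left
      rw [heq]
      simp
  · rw [if_neg hcond]
    constructor
    · exact ⟨[], by simp, by simpa using hnd, by simp⟩
    · by_cases hnv : n ∈ s.2
      · left; simp [hnv]
      · right
        rintro ⟨hGt, hpos⟩
        exact hcond ⟨hGt, hnv, hpos⟩

-- main invariant for port A
set_option maxHeartbeats 1000000 in
lemma dfsGo_spec (grid : List (List Int)) : ∀ fuel i j v c, pvU grid v ≤ fuel →
    pvBox grid (i, j) → v.Nodup →
    pvQ grid (i, j) v c (dfsGo grid fuel i j v c) ∧ pvSat grid (dfsGo grid fuel i j v c).2 (i, j) := by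
  intro fuel
  induction fuel with
  | zero =>
    intro i j v c hU hbox hnd
    refine ⟨⟨[], by simp [dfsGo], by simpa using hnd, by simp⟩, ?_⟩
    intro x hstep hxp
    simp only [dfsGo]
    exact pvU_zero grid v (by omega) x (pvStep_box grid _ _ hbox hstep)
  | succ fuel ih =>
    intro i j v c hU hbox hnd
    have h1 := pvBranchA grid fuel (i, j) (i, j - 1) (j > 0) (c, v)
      (fun hG => Or.inl ⟨rfl, hG⟩)
      (fun hG => pvStep_box grid _ _ hbox (Or.inl ⟨rfl, hG⟩))
      (by simpa using hU) (by simpa using hnd) ih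
    dsimp only at h1
    obtain ⟨hq1, hm1⟩ := h1
    obtain ⟨f1, he1, hnd1, hx1⟩ := hq1
    rw [he1] at hm1
    have hU1 : pvU grid (v ++ f1) ≤ fuel + 1 := by
      have := pvU_mono grid v (v ++ f1) (fun x hx => by simp [hx]); omega
    have h2 := pvBranchA grid fuel (i, j) (i + 1, j) (i < (grid.length : Int) - 1)
      (c + (f1.map (pvCell grid)).sum, v ++ f1)
      (fun hG => Or.inr (Or.inl ⟨rfl, hG⟩))
      (fun hG => pvStep_box grid _ _ hbox (Or.inr (Or.inl ⟨rfl, hG⟩)))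
      hU1 (by simpa using hnd1) ih
    dsimp only at h2
    obtain ⟨hq2, hm2⟩ := h2
    obtain ⟨f2, he2, hnd2, hx2⟩ := hq2
    rw [he2] at hm2
    have hU2 : pvU grid ((v ++ f1) ++ f2) ≤ fuel + 1 := by
      have := pvU_mono grid v ((v ++ f1) ++ f2) (fun x hx => by simp [hx]); omega
    have h3 := pvBranchA grid fuel (i, j) (i, j + 1) (j < ((grid.headD []).length : Int) - 1)
      (c + (f1.map (pvCell grid)).sum + (f2.map (pvCell grid)).sum, (v ++ f1) ++ f2)
      (fun hG => Or.inr (Or.inr (Or.inl ⟨rfl, hG⟩)))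
      (fun hG => pvStep_box grid _ _ hbox (Or.inr (Or.inr (Or.inl ⟨rfl, hG⟩))))
      hU2 (by simpa using hnd2) ih
    dsimp only at h3
    obtain ⟨hq3, hm3⟩ := h3
    obtain ⟨f3, he3, hnd3, hx3⟩ := hq3
    rw [he3] at hm3
    have hU3 : pvU grid (((v ++ f1) ++ f2) ++ f3) ≤ fuel + 1 := by
      have := pvU_mono grid v (((v ++ f1) ++ f2) ++ f3) (fun x hx => by simp [hx]); omega
    have h4 := pvBranchA grid fuel (i, j) (i - 1, j) (i > 0)
      (c + (f1.map (pvCell grid)).sum + (f2.map (pvCell grid)).sum + (f3.map (pvCell grid)).sum,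
        ((v ++ f1) ++ f2) ++ f3)
      (fun hG => Or.inr (Or.inr (Or.inr ⟨rfl, hG⟩)))
      (fun hG => pvStep_box grid _ _ hbox (Or.inr (Or.inr (Or.inr ⟨rfl, hG⟩))))
      hU3 (by simpa using hnd3) ih
    dsimp only at h4
    obtain ⟨hq4, hm4⟩ := h4
    obtain ⟨f4, he4, hnd4, hx4⟩ := hq4
    rw [he4] at hm4
    have hgoal : dfsGo grid (fuel + 1) i j v c
        = (c + (f1.map (pvCell grid)).sum + (f2.map (pvCell grid)).sum
            + (f3.map (pvCell grid)).sum + (f4.map (pvCell grid)).sum,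
           (((v ++ f1) ++ f2) ++ f3) ++ f4) := by
      simp only [dfsGo, he1, he2, he3, he4]
    constructor
    · rw [hgoal]
      refine pvQ_chain grid (i, j) v c
        (c + (f1.map (pvCell grid)).sum + (f2.map (pvCell grid)).sum + (f3.map (pvCell grid)).sum,
          ((v ++ f1) ++ f2) ++ f3) _
        (pvQ_chain grid (i, j) v c
          (c + (f1.map (pvCell grid)).sum + (f2.map (pvCell grid)).sum, (v ++ f1) ++ f2) _
          (pvQ_chain grid (i, j) v c
            (c + (f1.map (pvCell grid)).sum, v ++ f1) _
            ⟨f1, rfl, hnd1, hx1⟩ ⟨f2, rfl, hnd2, hx2⟩)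
          ⟨f3, rfl, hnd3, hx3⟩)
        ⟨f4, rfl, hnd4, hx4⟩
    · rw [hgoal]
      intro y hstep hypos
      dsimp only
      rcases hstep with ⟨rfl, hg⟩ | ⟨rfl, hg⟩ | ⟨rfl, hg⟩ | ⟨rfl, hg⟩
      · rcases hm1 with h | h
        · exact List.mem_append_left _ (List.mem_append_left _ (List.mem_append_left _ h))
        · exact absurd ⟨hg, hypos⟩ h
      · rcases hm2 with h | h
        · exact List.mem_append_left _ (List.mem_append_left _ h)
        · exact absurd ⟨hg, hypos⟩ h
      · rcases hm3 with h | h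
        · exact List.mem_append_left _ h
        · exact absurd ⟨hg, hypos⟩ h
      · rcases hm4 with h | h
        · exact h
        · exact absurd ⟨hg, hypos⟩ h

lemma mem_ite_singleton {α : Type} (G : Prop) [Decidable G] (x c : α) :
    c ∈ (if G then [x] else []) ↔ (c = x ∧ G) := by
  split_ifs with h <;> simp [h]

lemma mem_ite_append {α : Type} (G : Prop) [Decidable G] (l : List α) (x c : α) :
    c ∈ (if G then l ++ [x] else l) ↔ c ∈ l ∨ (c = x ∧ G) := by
  split_ifs with h <;> simp [h]

-- nbrs is exactly the pvStep relation
lemma mem_nbrs (grid : List (List Int)) (ci cj : Int) (c : Int × Int) :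
    c ∈ nbrs grid ci cj ↔ pvStep grid (ci, cj) c := by
  simp only [nbrs, pvStep, mem_ite_append, mem_ite_singleton]
  tauto

-- B's inner loop over the neighbor list of one cell p
lemma visitNbr_fold (grid : List (List Int)) (p : Int × Int) :
    ∀ (ns : List (Int × Int)) (nxt v : List (Int × Int)) (t : Int),
    (∀ n ∈ ns, pvStep grid p n ∧ pvBox grid n) → v.Nodup →
    ∃ new, ns.foldl (visitNbr grid) (nxt, v, t)
        = (nxt ++ new, v ++ new, t + (new.map (pvCell grid)).sum) ∧
      (v ++ new).Nodup ∧ pvU grid (v ++ new) + new.length = pvU grid v ∧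
      (∀ x ∈ new, pvElig grid v x ∧ pvStep grid p x ∧ pvBox grid x) ∧
      (∀ n ∈ ns, n ∈ v ++ new ∨ ¬ pvCell grid n > 0) := by
  intro ns
  induction ns with
  | nil =>
    intro nxt v t _ hnd
    exact ⟨[], by simp, by simpa using hnd, by simp, by simp, by simp⟩
  | cons n rest ih =>
    intro nxt v t hns hnd
    obtain ⟨hstep, hbox⟩ := hns n (List.mem_cons_self ..)
    rw [List.foldl_cons]
    by_cases hcond : n ∉ v ∧ pvCell grid n > 0
    · have hstate : visitNbr grid (nxt, v, t) n
          = (nxt ++ [n], v ++ [n], t + pvCell grid n) := by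
        simp only [visitNbr, if_pos hcond]
        rw [pvSet_add_eq _ _ hcond.1]
      have hnd1 : (v ++ [n]).Nodup := by
        simp only [List.nodup_append, List.nodup_singleton]
        exact ⟨hnd, trivial, fun a ha b hb' => by
          rw [List.mem_singleton] at hb'; subst hb'; exact fun h => hcond.1 (h ▸ ha)⟩
      obtain ⟨new2, heq, hnd2, hU2, hx2, hm2⟩ :=
        ih (nxt ++ [n]) (v ++ [n]) (t + pvCell grid n)
          (fun m hm => hns m (List.mem_cons_of_mem _ hm)) hnd1
      have hUsnoc := pvU_snoc grid v n hbox hcond.1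
      refine ⟨n :: new2, ?_, ?_, ?_, ?_, ?_⟩
      · rw [hstate, heq]
        simp [List.append_assoc, add_assoc]
      · simpa [List.append_assoc] using hnd2
      · have hv : v ++ n :: new2 = (v ++ [n]) ++ new2 := by simp
        rw [hv, List.length_cons]
        omega
      · intro x hx
        rcases List.mem_cons.mp hx with rfl | hx
        · exact ⟨⟨hcond.1, hcond.2⟩, hstep, hbox⟩
        · obtain ⟨he, hs, hb⟩ := hx2 x hx
          exact ⟨⟨fun hxv => he.1 (by simp [hxv]), he.2⟩, hs, hb⟩
      · intro m hm
        rcases List.mem_cons.mp hm with rfl | hm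
        · left; simp
        · rcases hm2 m hm with h | h
          · left; simpa [List.append_assoc] using h
          · right; exact h
    · have hstate : visitNbr grid (nxt, v, t) n = (nxt, v, t) := by
        simp only [visitNbr, if_neg hcond]
      obtain ⟨new2, heq, hnd2, hU2, hx2, hm2⟩ :=
        ih nxt v t (fun m hm => hns m (List.mem_cons_of_mem _ hm)) hnd
      refine ⟨new2, by rw [hstate]; exact heq, hnd2, hU2, hx2, ?_⟩
      intro m hm
      rcases List.mem_cons.mp hm with rfl | hm
      · by_cases hmv : m ∈ v
        · left; simp [hmv]
        · right; intro hpos; exact hcond ⟨hmv, hpos⟩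
      · exact hm2 m hm

-- B's outer loop over one frontier level
lemma visitCell_fold (grid : List (List Int)) :
    ∀ (frontier : List (Int × Int)) (nxt v : List (Int × Int)) (t : Int),
    (∀ p ∈ frontier, pvBox grid p) → v.Nodup →
    ∃ new, frontier.foldl (visitCell grid) (nxt, v, t)
        = (nxt ++ new, v ++ new, t + (new.map (pvCell grid)).sum) ∧
      (v ++ new).Nodup ∧ pvU grid (v ++ new) + new.length = pvU grid v ∧
      (∀ x ∈ new, pvElig grid v x ∧ pvBox grid x ∧ ∃ p ∈ frontier, pvStep grid p x) ∧
      (∀ p ∈ frontier, pvSat grid (v ++ new) p) := by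
  intro frontier
  induction frontier with
  | nil =>
    intro nxt v t _ hnd
    exact ⟨[], by simp, by simpa using hnd, by simp, by simp, by simp⟩
  | cons p rest ih =>
    intro nxt v t hbox hnd
    have hpbox := hbox p (List.mem_cons_self ..)
    rw [List.foldl_cons]
    obtain ⟨new1, heq1, hnd1, hU1, hx1, hm1⟩ :=
      visitNbr_fold grid p (nbrs grid p.1 p.2) nxt v t
        (fun n hn => by
          have hs := (mem_nbrs grid p.1 p.2 n).mp hn
          exact ⟨hs, pvStep_box grid _ _ hpbox hs⟩) hnd
    have hfold1 : visitCell grid (nxt, v, t) p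
        = (nxt ++ new1, v ++ new1, t + (new1.map (pvCell grid)).sum) := heq1
    obtain ⟨new2, heq2, hnd2, hU2, hx2, hs2⟩ :=
      ih (nxt ++ new1) (v ++ new1) (t + (new1.map (pvCell grid)).sum)
        (fun q hq => hbox q (List.mem_cons_of_mem _ hq)) hnd1
    refine ⟨new1 ++ new2, ?_, ?_, ?_, ?_, ?_⟩
    · rw [hfold1, heq2]
      simp [List.append_assoc, add_assoc]
    · simpa [List.append_assoc] using hnd2
    · rw [List.append_assoc] at hU2
      simp only [List.length_append]
      rw [show v ++ (new1 ++ new2) = (v ++ new1) ++ new2 by simp] at *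
      rw [List.append_assoc] at *
      omega
    · intro x hx
      rcases List.mem_append.mp hx with hx | hx
      · obtain ⟨he, hs, hb⟩ := hx1 x hx
        exact ⟨he, hb, ⟨p, List.mem_cons_self .., hs⟩⟩
      · obtain ⟨he, hb, q, hq, hs⟩ := hx2 x hx
        exact ⟨⟨fun hxv => he.1 (by simp [hxv]), he.2⟩, hb,
          ⟨q, List.mem_cons_of_mem _ hq, hs⟩⟩
    · intro q hq
      rcases List.mem_cons.mp hq with rfl | hq
      · intro c hc hpos
        rcases hm1 c ((mem_nbrs grid q.1 q.2 c).mpr hc) with h | h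
        · simpa [List.append_assoc] using List.mem_append_left new2 h
        · exact absurd hpos h
      · have := hs2 q hq
        simpa [List.append_assoc] using this

-- main invariant for port B: the while-frontier level loop
set_option maxHeartbeats 1000000 in
lemma bfsLevels_spec (grid : List (List Int)) : ∀ fuel frontier v t,
    pvU grid v + 2 ≤ fuel → (∀ p ∈ frontier, pvBox grid p) → v.Nodup →
    ∃ fresh, bfsLevels grid fuel frontier v t = (t + (fresh.map (pvCell grid)).sum, v ++ fresh) ∧
      (v ++ fresh).Nodup ∧
      (∀ x ∈ fresh, pvElig grid v x ∧ ∃ p ∈ frontier, pvReach grid v p x) ∧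
      (∀ x ∈ fresh, pvSat grid (v ++ fresh) x) ∧
      (∀ p ∈ frontier, pvSat grid (v ++ fresh) p) := by
  intro fuel
  induction fuel with
  | zero => intro _ _ _ hf; omega
  | succ fuel ih =>
    intro frontier v t hf hbox hnd
    cases frontier with
    | nil => exact ⟨[], by simp [bfsLevels], by simpa using hnd, by simp, by simp, by simp⟩
    | cons p rest =>
      obtain ⟨new, heq, hndN, hUN, hxN, hsN⟩ :=
        visitCell_fold grid (p :: rest) [] v t hbox hnd
      have hgoal : bfsLevels grid (fuel + 1) (p :: rest) v t
          = bfsLevels grid fuel new (v ++ new) (t + (new.map (pvCell grid)).sum) := by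
        simp only [bfsLevels, heq, List.nil_append]
      cases hempty : new with
      | nil =>
        subst hempty
        refine ⟨[], ?_, by simpa using hnd, by simp, by simp, ?_⟩
        · rw [hgoal]
          cases fuel <;> simp [bfsLevels]
        · intro q hq
          exact hsN q hq
      | cons a as =>
        have hlen : 1 ≤ new.length := by rw [hempty]; simp
        have hf' : pvU grid (v ++ new) + 2 ≤ fuel := by omega
        obtain ⟨fresh', heq', hnd', hxe', hxs', hps'⟩ :=
          ih new (v ++ new) (t + (new.map (pvCell grid)).sum) hf'
            (fun q hq => (hxN q hq).2.1) hndN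
        have hEq : (v ++ new) ++ fresh' = v ++ (new ++ fresh') := by simp
        rw [hEq] at heq' hnd' hxs' hps'
        refine ⟨new ++ fresh', ?_, hnd', ?_, ?_, ?_⟩
        · rw [hgoal, heq']
          simp [add_assoc]
        · intro x hx
          rcases List.mem_append.mp hx with hx | hx
          · obtain ⟨he, _, q, hq, hs⟩ := hxN x hx
            exact ⟨he, ⟨q, hq, pvReach.base _ _ hs he⟩⟩
          · obtain ⟨he', q', hq', hr⟩ := hxe' x hx
            have helig : pvElig grid v x := ⟨fun hc => he'.1 (by simp [hc]), he'.2⟩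
            have hr' := pvReach_mono grid v _ q' x (fun y hy => by simp [hy]) hr
            obtain ⟨heq'', _, q, hq, hs⟩ := hxN q' hq'
            exact ⟨helig, ⟨q, hq,
              pvReach_trans _ _ _ _ _ (pvReach.base _ _ hs heq'') hr'⟩⟩
        · intro x hx
          rcases List.mem_append.mp hx with hx | hx
          · exact hps' x hx
          · exact hxs' x hx
        · intro q hq
          have := hsN q hq
          refine pvSat_mono grid (v ++ new) _ q ?_ this
          intro y hy
          rcases List.mem_append.mp hy with h | h
          · simp [h]
          · simp [h]

-- every reachable cell lies in a saturated superset of v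
lemma pvClosure (grid : List (List Int)) (v V : List (Int × Int)) (s : Int × Int)
    (hV : ∀ p, p ∈ V → p ∉ v → pvSat grid V p) (hs : pvSat grid V s) :
    ∀ x, pvReach grid v s x → x ∈ V := by
  intro x hx
  induction hx with
  | base c hn he => exact hs c hn he.2
  | step p c hp hn he ih =>
    have hep := pvReach_elig _ _ _ _ hp
    exact hV p ih hep.1 c hn he.2

-- ===== VERDICT (by name: the statement is the Claim_ definition above) =====
theorem dfs_spec : Claim_equal_dfs := by
  intro grid i j v c _ hpre
  obtain ⟨hne, hrect, hok, hnd⟩ := hpre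
  have hUb := pvU_le grid v
  obtain ⟨hqA, hsatA⟩ := dfsGo_spec grid ((2 * grid.length) * (2 * (grid.headD []).length) + 1) i j v c
    (by omega) hok hnd
  obtain ⟨fA, heA, hndA, hxA⟩ := hqA
  rw [heA] at hsatA
  dsimp only at hsatA
  obtain ⟨fB, heB, hndB, hxB, hsB, hpB⟩ := bfsLevels_spec grid
    ((2 * grid.length) * (2 * (grid.headD []).length) + 2) [(i, j)] v c
    (by omega)
    (by intro p hp; rw [List.mem_singleton] at hp; subst hp; exact hok) hnd
  have hsatB : pvSat grid (v ++ fB) (i, j) := hpB (i, j) (by simp)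
  have hAB : ∀ x ∈ fA, x ∈ fB := by
    intro x hx
    obtain ⟨he, hr, _⟩ := hxA x hx
    have hxV : x ∈ v ++ fB :=
      pvClosure grid v (v ++ fB) (i, j)
        (fun p hp hpv => by
          rcases List.mem_append.mp hp with h | h
          · exact absurd h hpv
          · exact hsB p h)
        hsatB x hr
    rcases List.mem_append.mp hxV with h | h
    · exact absurd h he.1
    · exact h
  have hBA : ∀ x ∈ fB, x ∈ fA := by
    intro x hx
    obtain ⟨he, p, hps, hr⟩ := hxB x hx
    rw [List.mem_singleton] at hps
    subst hps
    have hxV : x ∈ v ++ fA :=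
      pvClosure grid v (v ++ fA) (i, j)
        (fun p hp hpv => by
          rcases List.mem_append.mp hp with h | h
          · exact absurd h hpv
          · exact (hxA p h).2.2)
        hsatA x hr
    rcases List.mem_append.mp hxV with h | h
    · exact absurd h he.1
    · exact h
  have hperm : fA.Perm fB :=
    (List.perm_ext_iff_of_nodup (hndA.of_append_right) (hndB.of_append_right)).mpr
      (fun a => ⟨hAB a, hBA a⟩)
  have hsum : (fA.map (pvCell grid)).sum = (fB.map (pvCell grid)).sum :=
    (hperm.map (pvCell grid)).sum_eq
  show dfs grid i j v c = dfs_alt grid i j v c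
  unfold dfs dfs_alt
  rw [heA, heB]
  dsimp only
  rw [hsum]
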